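-- pv_equiv track=rewrite | github.com/TomWatson6/AdventOfCode | Python/2016_new/13/solution.py | is_open
-- ===== SOURCE A (Python) =====
-- def is_open(number, x, y):
--     val = x * x + 3 * x + 2 * x * y + y + y * y
--     val += number
--     val = bin(val)
--     val = len([v for v in val if v == '1'])
--     if val % 2 == 0:
--         return True
--     return False
-- ===== SOURCE B (Python) =====
-- def is_open(number, x, y):
--     # Popcount parity by xor-folding: xor of the top half onto the bottom half
--     # preserves the number of set bits mod 2, and halves the bit-width each step.
--     n = abs(x * x + 3 * x + 2 * x * y + y + y * y + number)
--     while n > 1: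
--         k = (n.bit_length() + 1) // 2
--         n = (n >> k) ^ (n & ((1 << k) - 1))
--     return n == 0
-- ===== Notes on version B (the rewrite author's own statement) =====
-- stated objective: alternative
-- what changed: Replaces building bin()'s string and counting '1' characters with xor-folding: repeatedly xor the top half of abs(val) onto its bottom half (halving the bit-width each step) until the single remaining 0/1 bit is the popcount parity.
import Mathlib
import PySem

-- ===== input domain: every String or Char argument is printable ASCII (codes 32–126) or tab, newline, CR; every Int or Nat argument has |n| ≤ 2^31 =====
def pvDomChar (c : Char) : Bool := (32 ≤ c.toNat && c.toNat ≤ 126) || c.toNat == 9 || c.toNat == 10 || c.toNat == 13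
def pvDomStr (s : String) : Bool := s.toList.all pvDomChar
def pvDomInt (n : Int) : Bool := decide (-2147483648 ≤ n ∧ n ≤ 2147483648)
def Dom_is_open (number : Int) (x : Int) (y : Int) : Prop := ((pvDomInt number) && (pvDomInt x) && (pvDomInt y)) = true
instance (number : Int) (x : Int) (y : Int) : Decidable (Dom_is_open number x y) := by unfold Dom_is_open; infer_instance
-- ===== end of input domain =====

-- B replaces A's bin()-string '1'-count with xor-folding: the top half of the number is
-- xored onto the bottom half, halving the bit-width each step until the 0/1 parity remains;
-- objective: alternative (different algorithm, similar cost).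


-- ===== PORT A =====
-- Python's bin(v): binary digits of |v|, MSB first (empty for 0; bin adds the "0" itself below)
def binDigitsA (n : Nat) : List Char :=
  if n = 0 then []
  else binDigitsA (n / 2) ++ [if n % 2 = 1 then '1' else '0']
decreasing_by exact Nat.div_lt_self (Nat.pos_of_ne_zero (by assumption)) (by norm_num)

def is_open (number : Int) (x : Int) (y : Int) : Bool :=
  let val := x * x + 3 * x + 2 * x * y + y + y * y
  let val := val + number
  -- bin(val) as its character list: optional '-', then "0b", then the digits ("0" for zero)
  let s : List Char :=
    (if val < 0 then ['-'] else []) ++ ['0', 'b'] ++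
    (if val = 0 then ['0'] else binDigitsA val.natAbs)
  let cnt := (s.filter (fun v => v == '1')).length
  if cnt % 2 = 0 then true else false

-- ===== PORT B =====
-- one folding step strictly shrinks n (used for termination and by the proofs below)
lemma foldStep_lt (n : Nat) (h : ¬ n ≤ 1) :
    (n >>> ((Nat.size n + 1) / 2)) ^^^ (n &&& (2 ^ ((Nat.size n + 1) / 2) - 1)) < n := by
  have hn2 : 2 ≤ n := by omega
  have hL2 : 1 < Nat.size n := Nat.lt_size.mpr (by simpa using hn2)
  set L := Nat.size n with hL
  set k := (L + 1) / 2 with hk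
  have hnL : n < 2 ^ L := Nat.lt_size_self n
  have h1 : n >>> k < 2 ^ k := by
    rw [Nat.shiftRight_eq_div_pow]
    have hlt : n / 2 ^ k < 2 ^ (L - k) := by
      rw [Nat.div_lt_iff_lt_mul (Nat.two_pow_pos k)]
      calc n < 2 ^ L := hnL
        _ = 2 ^ (L - k) * 2 ^ k := by rw [← pow_add]; congr 1; omega
    exact lt_of_lt_of_le hlt (Nat.pow_le_pow_right (by norm_num) (by omega))
  have h2 : n &&& (2 ^ k - 1) < 2 ^ k := by
    rw [Nat.and_two_pow_sub_one_eq_mod]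
    exact Nat.mod_lt _ (Nat.two_pow_pos k)
  have hx := Nat.xor_lt_two_pow h1 h2
  have hk1 : 2 ^ k ≤ n := by
    have : 2 ^ (L - 1) ≤ n := Nat.lt_size.mp (by omega)
    exact le_trans (Nat.pow_le_pow_right (by norm_num) (by omega)) this
  omega

def foldParity (n : Nat) : Nat :=
  if h : n ≤ 1 then n
  else
    let k := (Nat.size n + 1) / 2
    foldParity ((n >>> k) ^^^ (n &&& (2 ^ k - 1)))
decreasing_by exact foldStep_lt n h

def is_open_alt (number : Int) (x : Int) (y : Int) : Bool :=
  let n := (x * x + 3 * x + 2 * x * y + y + y * y + number).natAbs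
  foldParity n == 0

-- ===== PRECONDITION & SPEC =====
def Spec_is_open (number : Int) (x : Int) (y : Int) (out : Bool) : Prop := out = is_open_alt number x y
instance (number : Int) (x : Int) (y : Int) (out : Bool) : Decidable (Spec_is_open number x y out) := by unfold Spec_is_open; infer_instance

-- ===== CLAIM (what is proved, stated in full; the proofs are below) =====
def Claim_equal_is_open : Prop := ∀ (number : Int) (x : Int) (y : Int), Dom_is_open number x y → Spec_is_open number x y (is_open number x y)

-- ===== LEMMAS AND PROOFS =====

-- reference popcount parity, bit by bit
def parityRec (n : Nat) : Nat :=
  if n = 0 then 0 else n % 2 ^^^ parityRec (n / 2)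
decreasing_by exact Nat.div_lt_self (Nat.pos_of_ne_zero (by assumption)) (by norm_num)

lemma parityRec_le_one (n : Nat) : parityRec n ≤ 1 := by
  induction n using Nat.strong_induction_on with
  | _ n ih =>
    rw [parityRec]
    by_cases h : n = 0
    · simp [h]
    · simp only [h, if_false]
      have h1 := ih (n / 2) (Nat.div_lt_self (Nat.pos_of_ne_zero h) (by norm_num))
      rcases Nat.mod_two_eq_zero_or_one n with h2 | h2 <;>
        rcases Nat.le_one_iff_eq_zero_or_eq_one.mp h1 with h3 | h3 <;> simp [h2, h3]

lemma parityRec_zero : parityRec 0 = 0 := by rw [parityRec, if_pos rfl]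

lemma parityRec_one : parityRec 1 = 1 := by rw [parityRec]; simp [parityRec_zero]

lemma xor_rearrange (w x y z : Nat) : (w ^^^ x) ^^^ (y ^^^ z) = (w ^^^ y) ^^^ (x ^^^ z) := by
  rw [Nat.xor_assoc, Nat.xor_assoc]
  congr 1
  rw [← Nat.xor_assoc, ← Nat.xor_assoc, Nat.xor_comm x y]

lemma parityRec_xor (a : Nat) : ∀ b, parityRec (a ^^^ b) = parityRec a ^^^ parityRec b := by
  induction a using Nat.strong_induction_on with
  | _ a ih =>
    intro b
    by_cases ha : a = 0
    · rw [ha, Nat.zero_xor, parityRec_zero, Nat.zero_xor]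
    · by_cases hab : a ^^^ b = 0
      · have hEq : a = b := Nat.xor_eq_zero_iff.mp hab
        rw [hab, parityRec_zero, hEq, Nat.xor_self]
      · conv_lhs => rw [parityRec, if_neg hab]
        conv_rhs => rw [parityRec, if_neg ha]
        have hmod : (a ^^^ b) % 2 = a % 2 ^^^ b % 2 := by
          have := Nat.xor_mod_two_pow (a := a) (b := b) (n := 1)
          simpa using this
        have hdiv : (a ^^^ b) / 2 = a / 2 ^^^ b / 2 := Nat.xor_div_two
        rw [hmod, hdiv, ih (a / 2) (Nat.div_lt_self (Nat.pos_of_ne_zero ha) (by norm_num)) (b / 2)]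
        rw [xor_rearrange]
        congr 1
        by_cases hb : b = 0
        · rw [hb]; simp [parityRec_zero]
        · conv_rhs => rw [parityRec, if_neg hb]

lemma parityRec_mul_pow_add (k : Nat) : ∀ a b, b < 2 ^ k →
    parityRec (a * 2 ^ k + b) = parityRec a ^^^ parityRec b := by
  induction k with
  | zero =>
    intro a b hb
    interval_cases b
    simp [parityRec_zero]
  | succ k ih =>
    intro a b hb
    have hpow : 2 ^ (k + 1) = 2 * 2 ^ k := by ring
    by_cases hm : a * 2 ^ (k + 1) + b = 0
    · have h1 : a * 2 ^ (k + 1) = 0 := by omega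
      have ha : a = 0 := by
        have h2 := Nat.two_pow_pos (k + 1)
        rcases Nat.mul_eq_zero.mp h1 with h | h
        · exact h
        · omega
      have hb0 : b = 0 := by omega
      simp [ha, hb0, parityRec_zero]
    · rw [parityRec, if_neg hm]
      have h2k : 0 < 2 ^ k := Nat.two_pow_pos k
      have ha2 : a * 2 ^ (k + 1) = 2 * (a * 2 ^ k) := by rw [hpow]; ring
      have hmod : (a * 2 ^ (k + 1) + b) % 2 = b % 2 := by rw [ha2]; omega
      have hdiv : (a * 2 ^ (k + 1) + b) / 2 = a * 2 ^ k + b / 2 := by rw [ha2]; omega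
      have hb2 : b / 2 < 2 ^ k := by rw [hpow] at hb; omega
      rw [hmod, hdiv, ih a (b / 2) hb2]
      have hbEq : parityRec b = b % 2 ^^^ parityRec (b / 2) := by
        by_cases hb0 : b = 0
        · rw [hb0]; simp [parityRec_zero]
        · conv_lhs => rw [parityRec, if_neg hb0]
      rw [hbEq, ← Nat.xor_assoc, Nat.xor_comm (b % 2) (parityRec a), Nat.xor_assoc]

lemma parityRec_split (n k : Nat) :
    parityRec n = parityRec (n >>> k) ^^^ parityRec (n % 2 ^ k) := by
  rw [Nat.shiftRight_eq_div_pow]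
  conv_lhs => rw [← Nat.div_add_mod n (2 ^ k), Nat.mul_comm]
  exact parityRec_mul_pow_add k _ _ (Nat.mod_lt _ (Nat.two_pow_pos k))

lemma foldParity_eq (n : Nat) : foldParity n = parityRec n := by
  induction n using Nat.strong_induction_on with
  | _ n ih =>
    by_cases h : n ≤ 1
    · interval_cases n
      · rw [parityRec_zero, foldParity]; norm_num
      · rw [parityRec_one, foldParity]; norm_num
    · rw [foldParity, dif_neg h,
        ih _ (foldStep_lt n h), parityRec_xor, Nat.and_two_pow_sub_one_eq_mod,
        ← parityRec_split]

lemma binCount_eq_parityRec (n : Nat) :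
    ((binDigitsA n).filter (fun v => v == '1')).length % 2 = parityRec n := by
  induction n using Nat.strong_induction_on with
  | _ n ih =>
    by_cases h : n = 0
    · rw [h, parityRec_zero, binDigitsA]; rfl
    · rw [binDigitsA, if_neg h, parityRec, if_neg h, List.filter_append]
      have hih := ih (n / 2) (Nat.div_lt_self (Nat.pos_of_ne_zero h) (by norm_num))
      have hle := parityRec_le_one (n / 2)
      rcases Nat.mod_two_eq_zero_or_one n with h2 | h2 <;>
        rcases Nat.le_one_iff_eq_zero_or_eq_one.mp hle with h3 | h3 <;>
        simp [h2, h3, Nat.add_mod, hih]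

-- ===== VERDICT (by name: the statement is the Claim_ definition above) =====
theorem is_open_spec : Claim_equal_is_open := by
  intro number x y _
  unfold Spec_is_open is_open is_open_alt
  have key : ((binDigitsA (x * x + 3 * x + 2 * x * y + y + y * y + number).natAbs).filter
      (fun v => v == '1')).length % 2 = parityRec (x * x + 3 * x + 2 * x * y + y + y * y + number).natAbs :=
    binCount_eq_parityRec _
  have hle : parityRec (x * x + 3 * x + 2 * x * y + y + y * y + number).natAbs ≤ 1 :=
    parityRec_le_one _
  have hfp : foldParity (x * x + 3 * x + 2 * x * y + y + y * y + number).natAbs =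
      parityRec (x * x + 3 * x + 2 * x * y + y + y * y + number).natAbs := foldParity_eq _
  have hf0 : foldParity 0 = 0 := by rw [foldParity]; norm_num
  simp only [List.filter_append]
  by_cases h0 : x * x + 3 * x + 2 * x * y + y + y * y + number = 0
  · simp [h0, hf0]
  · by_cases hn : x * x + 3 * x + 2 * x * y + y + y * y + number < 0 <;>
      rcases Nat.le_one_iff_eq_zero_or_eq_one.mp hle with h1 | h1 <;>
      simp [h0, hn, hfp, h1] <;> omega
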